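-- pv_equiv track=rewrite | github.com/CurlyCr8tive/Return-Ready | backend/services/synthesizer.py | parse_report_sections
-- ===== SOURCE A (Python) =====
-- def parse_report_sections(report_text: str) -> dict:
--     """Parse the Claude-generated report into labeled section dicts."""
--     sections = {
--         "full_text": report_text,
--         "month_summary": "",
--         "key_decisions": "",
--         "risks_open_items": "",
--         "wins_progress": "",
--         "external_relationships": "",
--         "team_health": "",
--         "first_week_focus": "",
--     }
--
--     section_markers = {
--         "1. THE MONTH IN 60 SECONDS": "month_summary",
--         "2. KEY DECISIONS MADE": "key_decisions",
--         "3. RISKS AND OPEN ITEMS": "risks_open_items",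
--         "4. WINS AND PROGRESS": "wins_progress",
--         "5. EXTERNAL RELATIONSHIPS": "external_relationships",
--         "6. TEAM HEALTH": "team_health",
--         "7. WHAT YOUR TEAM NEEDS": "first_week_focus",
--     }
--
--     lines = report_text.split("\n")
--     current_section = None
--     current_content: list[str] = []
--
--     for line in lines:
--         matched = None
--         for marker, key in section_markers.items():
--             if marker in line.upper():
--                 matched = key
--                 break
--
--         if matched:
--             if current_section:
--                 sections[current_section] = "\n".join(current_content).strip()
--             current_section = matched
--             current_content = []
--         elif current_section:
--             current_content.append(line)
--
--     if current_section and current_content: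
--         sections[current_section] = "\n".join(current_content).strip()
--
--     return sections
-- ===== SOURCE B (Python) =====
-- def parse_report_sections(report_text: str) -> dict:
--     """Parse the Claude-generated report into labeled section dicts (single reverse pass)."""
--     sections = {
--         "full_text": report_text,
--         "month_summary": "",
--         "key_decisions": "",
--         "risks_open_items": "",
--         "wins_progress": "",
--         "external_relationships": "",
--         "team_health": "",
--         "first_week_focus": "",
--     }
--
--     section_markers = {
--         "1. THE MONTH IN 60 SECONDS": "month_summary",
--         "2. KEY DECISIONS MADE": "key_decisions",
--         "3. RISKS AND OPEN ITEMS": "risks_open_items",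
--         "4. WINS AND PROGRESS": "wins_progress",
--         "5. EXTERNAL RELATIONSHIPS": "external_relationships",
--         "6. TEAM HEALTH": "team_health",
--         "7. WHAT YOUR TEAM NEEDS": "first_week_focus",
--     }
--
--     pending: list[str] = []
--     for line in reversed(report_text.split("\n")):
--         key = next((k for m, k in section_markers.items() if m in line.upper()), None)
--         if key is None:
--             pending.append(line)
--         else:
--             pending.reverse()
--             sections[key] = "\n".join(pending).strip()
--             pending = []
--     return sections
-- ===== Notes on version B (the rewrite author's own statement) =====
-- stated objective: alternative
-- what changed: A streams forward keeping a current-section key and a growing content buffer plus a post-loop flush; B makes a single reverse pass that collects pending lines and assigns each chunk when its header line is met, so no current-section state or final flush exists. Pre_ excludes texts where the same section header is matched on two or more lines: there A's last-occurrence-wins-unless-the-trailing-chunk-is-empty value and B's first-occurrence-wins value are both accidental readings of a duplicate header.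
import Mathlib
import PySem

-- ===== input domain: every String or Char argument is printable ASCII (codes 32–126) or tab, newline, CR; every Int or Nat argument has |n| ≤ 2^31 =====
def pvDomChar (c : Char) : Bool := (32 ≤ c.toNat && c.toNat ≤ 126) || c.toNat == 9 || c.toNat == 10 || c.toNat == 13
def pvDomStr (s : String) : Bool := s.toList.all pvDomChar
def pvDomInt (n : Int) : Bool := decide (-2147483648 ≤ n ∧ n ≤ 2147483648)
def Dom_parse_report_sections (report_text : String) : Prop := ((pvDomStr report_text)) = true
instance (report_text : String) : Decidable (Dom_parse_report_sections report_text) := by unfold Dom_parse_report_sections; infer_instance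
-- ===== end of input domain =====

-- B replaces A's forward scan (current-section register + content buffer + post-loop flush) by a
-- single reverse pass that assigns each section's chunk the moment its header line is met.

-- shared helpers of both versions: report_text.split("\n") (sep ≠ "" so split? is some), the
-- default dict and the marker table
def pvLines (t : String) : List String := (PySem.Str.split? t "\n").getD []

def pvSectionsInit (report_text : String) : PySem.Dict String String :=
  PySem.Dict.ofList
    [("full_text", report_text), ("month_summary", ""), ("key_decisions", ""),
     ("risks_open_items", ""), ("wins_progress", ""), ("external_relationships", ""),
     ("team_health", ""), ("first_week_focus", "")]

def pvMarkers : List (String × String) :=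
  [("1. THE MONTH IN 60 SECONDS", "month_summary"),
   ("2. KEY DECISIONS MADE", "key_decisions"),
   ("3. RISKS AND OPEN ITEMS", "risks_open_items"),
   ("4. WINS AND PROGRESS", "wins_progress"),
   ("5. EXTERNAL RELATIONSHIPS", "external_relationships"),
   ("6. TEAM HEALTH", "team_health"),
   ("7. WHAT YOUR TEAM NEEDS", "first_week_focus")]

-- ===== PORT A =====
-- A's inner 'for marker, key in section_markers.items(): if marker in line.upper(): matched = key; break'
def pvMatchLoop : List (String × String) → String → Option String
  | [], _ => none
  | (marker, key) :: rest, line =>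
      if PySem.Str.isIn marker (PySem.Str.upper line) then some key else pvMatchLoop rest line

def parse_report_sections (report_text : String) : List (String × String) :=
  let sections := pvSectionsInit report_text
  let lines := pvLines report_text
  let st :=
    lines.foldl
      (fun (st : PySem.Dict String String × Option String × List String) line =>
        match pvMatchLoop pvMarkers line with
        | some matched =>
            let sections' :=
              match st.2.1 with
              | some cur => st.1.insert cur (PySem.Str.strip (PySem.Str.join "\n" st.2.2))
              | none => st.1
            (sections', some matched, [])
        | none =>
            match st.2.1 with
            | some _ => (st.1, st.2.1, st.2.2 ++ [line])
            | none => (st.1, st.2.1, st.2.2))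
      ((sections, none, []) : PySem.Dict String String × Option String × List String)
  match st.2.1, st.2.2 with
  | some cur, _ :: _ =>
      (st.1.insert cur (PySem.Str.strip (PySem.Str.join "\n" st.2.2))).items
  | _, _ => st.1.items

-- ===== PORT B =====
-- B's 'next((k for m, k in section_markers.items() if m in line.upper()), None)'
def pvFirstKey (line : String) : Option String :=
  (pvMarkers.find? (fun p => PySem.Str.isIn p.1 (PySem.Str.upper line))).map (·.2)

def parse_report_sections_alt (report_text : String) : List (String × String) :=
  let st :=
    (pvLines report_text).reverse.foldl
      (fun (st : PySem.Dict String String × List String) line =>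
        match pvFirstKey line with
        | none => (st.1, st.2 ++ [line])
        | some key =>
            (st.1.insert key (PySem.Str.strip (PySem.Str.join "\n" st.2.reverse)), []))
      ((pvSectionsInit report_text, []) : PySem.Dict String String × List String)
  st.1.items

-- ===== PRECONDITION & SPEC =====
-- Pre_ excludes texts in which the same section header is matched on two or more lines: on such
-- duplicate-header texts A's value (last occurrence wins, unless its trailing chunk is empty) and
-- B's value (first occurrence wins) are equally accidental readings of an unspecified corner.
def Pre_parse_report_sections (report_text : String) : Prop :=
  ((pvLines report_text).filterMap pvFirstKey).Nodup

instance (report_text : String) : Decidable (Pre_parse_report_sections report_text) := by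
  unfold Pre_parse_report_sections; infer_instance

def pvWitness_parse_report_sections : String :=
  "1. THE MONTH IN 60 SECONDS\nhello\n6. TEAM HEALTH"

def Spec_parse_report_sections (report_text : String) (out : List (String × String)) : Prop :=
  out = parse_report_sections_alt report_text

instance (report_text : String) (out : List (String × String)) :
    Decidable (Spec_parse_report_sections report_text out) := by
  unfold Spec_parse_report_sections; infer_instance

-- ===== CLAIM (what is proved, stated in full; the proofs are below) =====
def Claim_equal_parse_report_sections : Prop :=
  ∀ (report_text : String), Dom_parse_report_sections report_text →
    Pre_parse_report_sections report_text →
      Spec_parse_report_sections report_text (parse_report_sections report_text)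

-- ===== LEMMAS AND PROOFS =====

-- names for the two loop bodies of the ports (definitionally the lambdas used there)
def pvStepA (st : PySem.Dict String String × Option String × List String) (line : String) :
    PySem.Dict String String × Option String × List String :=
  match pvMatchLoop pvMarkers line with
  | some matched =>
      let sections' :=
        match st.2.1 with
        | some cur => st.1.insert cur (PySem.Str.strip (PySem.Str.join "\n" st.2.2))
        | none => st.1
      (sections', some matched, [])
  | none =>
      match st.2.1 with
      | some _ => (st.1, st.2.1, st.2.2 ++ [line])
      | none => (st.1, st.2.1, st.2.2)

def pvFinA (st : PySem.Dict String String × Option String × List String) :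
    PySem.Dict String String :=
  match st.2.1, st.2.2 with
  | some cur, _ :: _ => st.1.insert cur (PySem.Str.strip (PySem.Str.join "\n" st.2.2))
  | _, _ => st.1

def pvStepB (st : PySem.Dict String String × List String) (line : String) :
    PySem.Dict String String × List String :=
  match pvFirstKey line with
  | none => (st.1, st.2 ++ [line])
  | some key =>
      (st.1.insert key (PySem.Str.strip (PySem.Str.join "\n" st.2.reverse)), [])

theorem parseA_eq (t : String) :
    parse_report_sections t =
      (pvFinA ((pvLines t).foldl pvStepA (pvSectionsInit t, none, []))).items := by
  have h1 : parse_report_sections t =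
      (let st := (pvLines t).foldl pvStepA (pvSectionsInit t, none, [])
       match st.2.1, st.2.2 with
       | some cur, _ :: _ =>
           (st.1.insert cur (PySem.Str.strip (PySem.Str.join "\n" st.2.2))).items
       | _, _ => st.1.items) := rfl
  rw [h1]
  generalize (pvLines t).foldl pvStepA (pvSectionsInit t, none, []) = st
  rcases st with ⟨d, cur, content⟩
  cases cur <;> cases content <;> rfl

theorem parseB_eq (t : String) :
    parse_report_sections_alt t =
      (((pvLines t).reverse.foldl pvStepB (pvSectionsInit t, [])).1).items := rfl

theorem pvMatchLoop_eq_firstKey (l : String) : pvMatchLoop pvMarkers l = pvFirstKey l := by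
  show pvMatchLoop pvMarkers l =
    (pvMarkers.find? (fun p => PySem.Str.isIn p.1 (PySem.Str.upper l))).map (·.2)
  induction pvMarkers with
  | nil => rfl
  | cons p rest ih =>
      obtain ⟨m, k⟩ := p
      by_cases h : PySem.Chars.isIn m.toList (PySem.Chars.upper l.toList) = true
      · simp [pvMatchLoop, h]
      · simp only [Bool.not_eq_true] at h
        simp [pvMatchLoop, h, ih]

-- whether a line is ordinary text (no section header on it)
def pvIsText (l : String) : Bool := (pvFirstKey l).isNone

-- the blocks of a line list: (key of header line, stripped joined chunk below it), in order
def pvBlocksAux (k : String) (acc : List String) : List String → List (String × String)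
  | [] => [(k, PySem.Str.strip (PySem.Str.join "\n" acc))]
  | l :: ls =>
      match pvFirstKey l with
      | some k2 => (k, PySem.Str.strip (PySem.Str.join "\n" acc)) :: pvBlocksAux k2 [] ls
      | none => pvBlocksAux k (acc ++ [l]) ls

def pvBlocks : List String → List (String × String)
  | [] => []
  | l :: ls =>
      match pvFirstKey l with
      | some k => pvBlocksAux k [] ls
      | none => pvBlocks ls

def pvApply (d : PySem.Dict String String) (bs : List (String × String)) :
    PySem.Dict String String :=
  bs.foldl (fun d b => d.insert b.1 b.2) d

def pvApplyRev (d : PySem.Dict String String) (bs : List (String × String)) :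
    PySem.Dict String String :=
  bs.foldr (fun b d => d.insert b.1 b.2) d

theorem keys_pvBlocksAux : ∀ (ls : List String) (k : String) (acc : List String),
    (pvBlocksAux k acc ls).map Prod.fst = k :: ls.filterMap pvFirstKey := by
  intro ls
  induction ls with
  | nil => intro k acc; rfl
  | cons l ls ih =>
      intro k acc
      cases h : pvFirstKey l with
      | some k2 => simp [pvBlocksAux, h, ih]
      | none => simp [pvBlocksAux, h, ih]

theorem keys_pvBlocks : ∀ (ls : List String),
    (pvBlocks ls).map Prod.fst = ls.filterMap pvFirstKey := by
  intro ls
  induction ls with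
  | nil => rfl
  | cons l ls ih =>
      cases h : pvFirstKey l with
      | some k => simp [pvBlocks, h, keys_pvBlocksAux]
      | none => simp [pvBlocks, h, ih]

-- inserting the value a (Nodup-keyed) dict already holds is a no-op
theorem pv_insert_self (d : PySem.Dict String String) (k v : String)
    (hnd : d.keys.Nodup) (h : d.get? k = some v) : d.insert k v = d := by
  have hc : d.contains k = true := by
    rw [PySem.Dict.contains_eq_isSome_get?, h]; rfl
  apply PySem.Dict.ext
  rw [PySem.Dict.items_insert_of_contains _ _ hc]
  have : ∀ p ∈ d.items, (if p.1 == k then (k, v) else p) = p := by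
    intro p hp
    by_cases hpk : p.1 = k
    · have : d.get? p.1 = some p.2 := PySem.Dict.get?_of_mem_items d hp hnd
      rw [hpk] at this
      rw [h] at this
      simp only [hpk, beq_self_eq_true, if_true]
      cases p with
      | mk a b => simp at hpk ⊢; simp at this; exact ⟨hpk.symm ▸ rfl, by simpa using this⟩
    · simp [hpk]
  calc d.items.map (fun p => if p.1 == k then (k, v) else p)
      = d.items.map id := List.map_congr_left (by simpa using this)
    _ = d.items := List.map_id _

-- two inserts at distinct, already-present keys commute as dicts
theorem pv_insert_comm (d : PySem.Dict String String) (k k2 v v2 : String) (hne : k ≠ k2)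
    (hk : d.contains k = true) (hk2 : d.contains k2 = true) :
    (d.insert k v).insert k2 v2 = (d.insert k2 v2).insert k v := by
  apply PySem.Dict.ext
  have hk' : (d.insert k v).contains k2 = true := by
    rw [PySem.Dict.contains_insert]; simp [hk2]
  have hk2' : (d.insert k2 v2).contains k = true := by
    rw [PySem.Dict.contains_insert]; simp [hk]
  rw [PySem.Dict.items_insert_of_contains _ _ hk', PySem.Dict.items_insert_of_contains _ _ hk2',
      PySem.Dict.items_insert_of_contains _ _ hk, PySem.Dict.items_insert_of_contains _ _ hk2,
      List.map_map, List.map_map]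
  apply List.map_congr_left
  intro p _
  by_cases h1 : p.1 = k
  · simp [Function.comp, h1, hne]
  · by_cases h2 : p.1 = k2
    · simp [Function.comp, h2, Ne.symm hne]
    · simp [Function.comp, h1, h2]

theorem pv_contains_applyRev : ∀ (bs : List (String × String)) (d : PySem.Dict String String)
    (j : String), d.contains j = true → (pvApplyRev d bs).contains j = true := by
  intro bs
  induction bs with
  | nil => intro d j h; exact h
  | cons b bs ih =>
      intro d j h
      show ((pvApplyRev d bs).insert b.1 b.2).contains j = true
      rw [PySem.Dict.contains_insert]
      simp [ih d j h]

theorem pv_applyRev_insert_comm : ∀ (bs : List (String × String))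
    (d : PySem.Dict String String) (k v : String),
    d.contains k = true → (∀ b ∈ bs, d.contains b.1 = true) → (∀ b ∈ bs, b.1 ≠ k) →
    pvApplyRev (d.insert k v) bs = (pvApplyRev d bs).insert k v := by
  intro bs
  induction bs with
  | nil => intro d k v _ _ _; rfl
  | cons b bs ih =>
      intro d k v hk hall hne
      show (pvApplyRev (d.insert k v) bs).insert b.1 b.2
          = ((pvApplyRev d bs).insert b.1 b.2).insert k v
      rw [ih d k v hk (fun b hb => hall b (List.mem_cons_of_mem _ hb))
            (fun b hb => hne b (List.mem_cons_of_mem _ hb))]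
      exact pv_insert_comm (pvApplyRev d bs) k b.1 v b.2
        (Ne.symm (hne b List.mem_cons_self))
        (pv_contains_applyRev bs d k hk)
        (pv_contains_applyRev bs d b.1 (hall b List.mem_cons_self))

theorem pv_apply_eq_rev : ∀ (bs : List (String × String)) (d : PySem.Dict String String),
    (bs.map Prod.fst).Nodup → (∀ b ∈ bs, d.contains b.1 = true) →
    pvApply d bs = pvApplyRev d bs := by
  intro bs
  induction bs with
  | nil => intro d _ _; rfl
  | cons b bs ih =>
      intro d hnd hall
      show pvApply (d.insert b.1 b.2) bs = (pvApplyRev d bs).insert b.1 b.2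
      rw [ih (d.insert b.1 b.2) (by simpa using hnd.of_cons)
            (fun c hc => by
              rw [PySem.Dict.contains_insert]
              simp [hall c (List.mem_cons_of_mem _ hc)])]
      apply pv_applyRev_insert_comm
      · exact hall b List.mem_cons_self
      · exact fun c hc => hall c (List.mem_cons_of_mem _ hc)
      · intro c hc
        simp only [List.map_cons, List.nodup_cons] at hnd
        exact fun h => hnd.1 (h ▸ List.mem_map_of_mem hc)

-- A's loop from a running section equals applying the remaining blocks front-to-back
theorem pv_runA_some : ∀ (ls : List String) (acc : List String) (k : String)
    (d : PySem.Dict String String), d.keys.Nodup →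
    (k :: ls.filterMap pvFirstKey).Nodup →
    (∀ j ∈ k :: ls.filterMap pvFirstKey, d.get? j = some "") →
    pvFinA (ls.foldl pvStepA (d, some k, acc)) = pvApply d (pvBlocksAux k acc ls) := by
  intro ls
  induction ls with
  | nil =>
      intro acc k d hnd _ h2
      cases acc with
      | nil =>
          show d = pvApply d [(k, PySem.Str.strip (PySem.Str.join "\n" []))]
          show d = d.insert k (PySem.Str.strip (PySem.Str.join "\n" []))
          exact (pv_insert_self d k _ hnd (h2 k List.mem_cons_self)).symm
      | cons a as => rfl
  | cons l ls ih =>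
      intro acc k d hnd h1 h2
      rw [List.foldl_cons]
      have hstep : pvStepA (d, some k, acc) l =
          (match pvFirstKey l with
           | some matched =>
               (d.insert k (PySem.Str.strip (PySem.Str.join "\n" acc)), some matched, [])
           | none => (d, some k, acc ++ [l])) := by
        simp only [pvStepA, pvMatchLoop_eq_firstKey]
      cases hl : pvFirstKey l with
      | some k2 =>
          rw [hstep]; simp only [hl]
          have hfm : (l :: ls).filterMap pvFirstKey = k2 :: ls.filterMap pvFirstKey := by
            simp [hl]
          rw [hfm] at h1 h2
          have hknotin : k ∉ k2 :: ls.filterMap pvFirstKey := (List.nodup_cons.mp h1).1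
          have := ih [] k2 (d.insert k (PySem.Str.strip (PySem.Str.join "\n" acc)))
            (PySem.Dict.nodup_keys_insert _ _ _ hnd)
            ((List.nodup_cons.mp h1).2)
            (fun j hj => by
              rw [PySem.Dict.get?_insert_of_ne _ _ (fun h => hknotin (by rw [← h]; exact hj))]
              exact h2 j (List.mem_cons_of_mem _ hj))
          rw [this]
          show pvApply (d.insert k (PySem.Str.strip (PySem.Str.join "\n" acc))) (pvBlocksAux k2 [] ls) =
            pvApply d (pvBlocksAux k acc (l :: ls))
          simp [pvBlocksAux, hl, pvApply]
      | none =>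
          rw [hstep]; simp only [hl]
          have hfm : (l :: ls).filterMap pvFirstKey = ls.filterMap pvFirstKey := by
            simp [hl]
          rw [hfm] at h1 h2
          rw [ih (acc ++ [l]) k d hnd h1 h2]
          show pvApply d (pvBlocksAux k (acc ++ [l]) ls) =
            pvApply d (pvBlocksAux k acc (l :: ls))
          simp [pvBlocksAux, hl]

theorem pv_runA_none : ∀ (ls : List String) (d : PySem.Dict String String), d.keys.Nodup →
    (ls.filterMap pvFirstKey).Nodup →
    (∀ j ∈ ls.filterMap pvFirstKey, d.get? j = some "") →
    pvFinA (ls.foldl pvStepA (d, none, [])) = pvApply d (pvBlocks ls) := by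
  intro ls
  induction ls with
  | nil => intro d _ _ _; rfl
  | cons l ls ih =>
      intro d hnd h1 h2
      rw [List.foldl_cons]
      have hstep : pvStepA (d, none, []) l =
          (match pvFirstKey l with
           | some matched => (d, some matched, [])
           | none => (d, none, [])) := by
        simp only [pvStepA, pvMatchLoop_eq_firstKey]
      cases hl : pvFirstKey l with
      | some k =>
          rw [hstep]; simp only [hl]
          have hfm : (l :: ls).filterMap pvFirstKey = k :: ls.filterMap pvFirstKey := by
            simp [hl]
          rw [hfm] at h1 h2
          rw [pv_runA_some ls [] k d hnd h1 h2]
          show pvApply d (pvBlocksAux k [] ls) = pvApply d (pvBlocks (l :: ls))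
          simp [pvBlocks, hl]
      | none =>
          rw [hstep]; simp only [hl]
          have hfm : (l :: ls).filterMap pvFirstKey = ls.filterMap pvFirstKey := by
            simp [hl]
          rw [hfm] at h1 h2
          rw [ih d hnd h1 h2]
          show pvApply d (pvBlocks ls) = pvApply d (pvBlocks (l :: ls))
          simp [pvBlocks, hl]

theorem pvBlocks_dropWhile : ∀ (ls : List String),
    pvBlocks (ls.dropWhile pvIsText) = pvBlocks ls := by
  intro ls
  induction ls with
  | nil => rfl
  | cons l ls ih =>
      cases hl : pvFirstKey l with
      | some k =>
          have : pvIsText l = false := by simp [pvIsText, hl]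
          simp [this]
      | none =>
          have : pvIsText l = true := by simp [pvIsText, hl]
          simp [this, ih, pvBlocks, hl]

theorem pvBlocksAux_cons : ∀ (ls : List String) (k : String) (acc : List String),
    pvBlocksAux k acc ls =
      (k, PySem.Str.strip (PySem.Str.join "\n" (acc ++ ls.takeWhile pvIsText)))
        :: pvBlocks (ls.dropWhile pvIsText) := by
  intro ls
  induction ls with
  | nil => intro k acc; simp [pvBlocksAux, pvBlocks]
  | cons l ls ih =>
      intro k acc
      cases hl : pvFirstKey l with
      | some k2 =>
          have ht : pvIsText l = false := by simp [pvIsText, hl]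
          simp [pvBlocksAux, hl, ht, pvBlocks]
      | none =>
          have ht : pvIsText l = true := by simp [pvIsText, hl]
          rw [show pvBlocksAux k acc (l :: ls) = pvBlocksAux k (acc ++ [l]) ls by
                simp [pvBlocksAux, hl]]
          rw [ih k (acc ++ [l])]
          simp [ht]

theorem pvApplyRev_cons (d : PySem.Dict String String) (b : String × String)
    (bs : List (String × String)) : pvApplyRev d (b :: bs) = (pvApplyRev d bs).insert b.1 b.2 := rfl

-- B's reverse loop equals applying the blocks back-to-front, pending = reversed leading text
theorem pv_runB : ∀ (ls : List String) (d : PySem.Dict String String),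
    ls.foldr (fun l st => pvStepB st l) (d, []) =
      (pvApplyRev d (pvBlocks ls), (ls.takeWhile pvIsText).reverse) := by
  intro ls
  induction ls with
  | nil => intro d; rfl
  | cons l ls ih =>
      intro d
      rw [List.foldr_cons, ih d]
      cases hl : pvFirstKey l with
      | none =>
          have ht : pvIsText l = true := by simp [pvIsText, hl]
          simp [pvStepB, hl, pvBlocks, ht]
      | some k =>
          have ht : pvIsText l = false := by simp [pvIsText, hl]
          have hb : pvBlocks (l :: ls) = pvBlocksAux k [] ls := by simp [pvBlocks, hl]
          have hstep : pvStepB (pvApplyRev d (pvBlocks ls), (ls.takeWhile pvIsText).reverse) l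
              = ((pvApplyRev d (pvBlocks ls)).insert k
                  (PySem.Str.strip
                    (PySem.Str.join "\n" ((ls.takeWhile pvIsText).reverse.reverse))), []) := by
            simp [pvStepB, hl]
          rw [hstep, hb, pvBlocksAux_cons, pvApplyRev_cons, pvBlocks_dropWhile]
          simp [ht]

theorem pv_firstKey_mem {l j : String} (h : pvFirstKey l = some j) :
    j ∈ pvMarkers.map Prod.snd := by
  unfold pvFirstKey at h
  rw [Option.map_eq_some_iff] at h
  obtain ⟨p, hp, rfl⟩ := h
  exact List.mem_map_of_mem (List.mem_of_find?_eq_some hp)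

set_option maxHeartbeats 2000000 in
theorem pv_get_init (t : String) : ∀ j ∈ pvMarkers.map Prod.snd,
    (pvSectionsInit t).get? j = some "" := by
  intro j hj
  simp only [pvMarkers, List.map] at hj
  fin_cases hj <;> rfl

-- ===== VERDICT (by name: the statement is the Claim_ definition above) =====
theorem parse_report_sections_spec : Claim_equal_parse_report_sections := by
  unfold Claim_equal_parse_report_sections
  intro t _ hpre
  unfold Spec_parse_report_sections
  unfold Pre_parse_report_sections at hpre
  rw [parseA_eq, parseB_eq, List.foldl_reverse, pv_runB]
  have hkeys : ∀ j ∈ (pvLines t).filterMap pvFirstKey, j ∈ pvMarkers.map Prod.snd := by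
    intro j hj
    rw [List.mem_filterMap] at hj
    obtain ⟨l, _, hl⟩ := hj
    exact pv_firstKey_mem hl
  have hget := pv_get_init t
  have hcont : ∀ j ∈ pvMarkers.map Prod.snd, (pvSectionsInit t).contains j = true := by
    intro j hj
    rw [PySem.Dict.contains_eq_isSome_get?, hget j hj]; rfl
  have hnd0 : (pvSectionsInit t).keys.Nodup := PySem.Dict.nodup_keys_ofList _
  rw [pv_runA_none (pvLines t) (pvSectionsInit t) hnd0 hpre
        (fun j hj => hget j (hkeys j hj))]
  rw [pv_apply_eq_rev (pvBlocks (pvLines t)) (pvSectionsInit t)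
        (by rw [keys_pvBlocks]; exact hpre)
        (fun b hb => hcont b.1 (hkeys b.1 (by
          rw [← keys_pvBlocks]; exact List.mem_map_of_mem hb)))]
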